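-- pv_equiv track=rewrite | github.com/shinsyzgz/429A | main.py | slice_index
-- ===== SOURCE A (Python) =====
-- PROCESSORS = 100
--
-- def slice_index(total_num):
--     c_size = int(total_num / PROCESSORS)
--     left = total_num - c_size * PROCESSORS
--     start, end = 0, c_size - 1 + int(0 < left)
--     record = [(start, end, 0)]
--     for x in range(1, PROCESSORS):
--         start = end + 1
--         end = start + c_size - 1 + int(x < left)
--         record.append((start, end, x))
--     return record
-- ===== SOURCE B (Python) =====
-- PROCESSORS = 100
--
-- def slice_index(total_num):
--     c_size = int(total_num / PROCESSORS)
--     left = total_num - c_size * PROCESSORS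
--
--     def bounds(x):
--         start = x * c_size + max(0, min(x, left))
--         return (start, start + c_size - 1 + (1 if x < left else 0), x)
--
--     return [bounds(x) for x in range(PROCESSORS)]
-- ===== Notes on version B (the rewrite author's own statement) =====
-- stated objective: alternative
-- what changed: Each slice is computed independently by a closed-form formula (start = x*c_size + max(0,min(x,left))) instead of chaining each start off the previous slice's end in a stateful loop.
import Mathlib
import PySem

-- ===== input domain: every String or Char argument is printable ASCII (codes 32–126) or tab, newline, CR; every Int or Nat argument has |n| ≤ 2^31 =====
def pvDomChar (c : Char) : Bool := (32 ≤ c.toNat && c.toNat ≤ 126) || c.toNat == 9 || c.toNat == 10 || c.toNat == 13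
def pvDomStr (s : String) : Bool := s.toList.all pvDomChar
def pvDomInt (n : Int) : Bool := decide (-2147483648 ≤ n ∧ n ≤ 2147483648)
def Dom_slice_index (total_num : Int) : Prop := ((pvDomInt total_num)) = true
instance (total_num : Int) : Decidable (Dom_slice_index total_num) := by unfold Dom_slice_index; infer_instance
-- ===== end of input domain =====

-- B replaces A's stateful chained loop by an independent closed-form formula per slice (objective: alternative decomposition).
-- Note: Python's int(total_num / 100) goes through a float; for |total_num| ≤ 2^31 this is exactly
-- truncating integer division (Int.tdiv), which is how both ports render it.

-- ===== PORT A =====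
def slice_index (total_num : Int) : List (Int × Int × Int) :=
  let c_size := Int.tdiv total_num 100          -- int(total_num / PROCESSORS), exact on Dom
  let left := total_num - c_size * 100
  let start : Int := 0
  let e : Int := c_size - 1 + (if 0 < left then 1 else 0)
  let record : List (Int × Int × Int) := [(start, e, 0)]
  (((PySem.List.pyRange 1 100 1).foldl
      (fun st x =>
        let s := st.2.1 + 1
        let e' := s + c_size - 1 + (if x < left then 1 else 0)
        (s, e', st.2.2 ++ [(s, e', x)]))
      (start, e, record)).2.2)

-- ===== PORT B =====
def slice_index_alt (total_num : Int) : List (Int × Int × Int) :=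
  let c_size := Int.tdiv total_num 100          -- int(total_num / PROCESSORS), exact on Dom
  let left := total_num - c_size * 100
  (PySem.List.pyRange 0 100 1).map (fun x =>
    let start := x * c_size + max 0 (min x left)
    (start, start + c_size - 1 + (if x < left then 1 else 0), x))

-- ===== PRECONDITION & SPEC =====
def Spec_slice_index (total_num : Int) (out : List (Int × Int × Int)) : Prop := out = slice_index_alt total_num
instance (total_num : Int) (out : List (Int × Int × Int)) : Decidable (Spec_slice_index total_num out) := by unfold Spec_slice_index; infer_instance

-- ===== CLAIM (what is proved, stated in full; the proofs are below) =====
def Claim_equal_slice_index : Prop := ∀ (total_num : Int), Dom_slice_index total_num → Spec_slice_index total_num (slice_index total_num)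

-- ===== LEMMAS AND PROOFS =====

-- closed-form start/end of slice x (B's formula)
def pvStart (c left x : Int) : Int := x * c + max 0 (min x left)
def pvEnd (c left x : Int) : Int := pvStart c left x + c - 1 + (if x < left then 1 else 0)

def pvG (c left : Int) (x : Int) : Int × Int × Int := (pvStart c left x, pvEnd c left x, x)

def pvStep (c left : Int) (st : Int × Int × List (Int × Int × Int)) (x : Int) :
    Int × Int × List (Int × Int × Int) :=
  let s := st.2.1 + 1
  let e' := s + c - 1 + (if x < left then 1 else 0)
  (s, e', st.2.2 ++ [(s, e', x)])

-- chaining identity: slice k starts right after the end of slice k-1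
theorem pvChain (c left k : Int) (hk : 1 ≤ k) :
    pvEnd c left (k - 1) + 1 = pvStart c left k := by
  unfold pvEnd pvStart
  have h : k * c = (k - 1) * c + c := by ring
  rw [h]
  generalize (k - 1) * c = a
  by_cases hb : k - 1 < left
  · rw [if_pos hb]; omega
  · rw [if_neg hb]; omega

-- loop invariant: starting with end = pvEnd (k-1), A's fold appends exactly B's closed forms
theorem pvInv (c left : Int) :
    ∀ (n : Nat) (k : Int), k + n = 100 → 1 ≤ k → ∀ (s : Int) (rec : List (Int × Int × Int)),
      ((PySem.List.pyRange k 100 1).foldl (pvStep c left) (s, pvEnd c left (k - 1), rec)).2.2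
        = rec ++ (PySem.List.pyRange k 100 1).map (pvG c left) := by
  intro n
  induction n with
  | zero =>
      intro k hk _ s rec
      have h100 : (100 : Int) ≤ k := by omega
      rw [PySem.List.pyRange_one_eq_nil h100]
      simp
  | succ m ih =>
      intro k hk h1 s rec
      have hlt : k < 100 := by omega
      rw [PySem.List.pyRange_one_cons hlt, List.foldl_cons, List.map_cons]
      have hstep : pvStep c left (s, pvEnd c left (k - 1), rec) k
          = (pvEnd c left (k - 1) + 1,
             pvEnd c left (k - 1) + 1 + c - 1 + (if k < left then 1 else 0),
             rec ++ [(pvEnd c left (k - 1) + 1,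
                      pvEnd c left (k - 1) + 1 + c - 1 + (if k < left then 1 else 0), k)]) := rfl
      rw [pvChain c left k h1] at hstep
      have e3 : (pvStart c left k, pvStart c left k + c - 1 + (if k < left then 1 else 0), k)
          = pvG c left k := rfl
      rw [e3] at hstep
      have e2 : pvStart c left k + c - 1 + (if k < left then 1 else 0)
          = pvEnd c left (k + 1 - 1) := by
        have hkk : k + 1 - 1 = k := by ring
        rw [hkk]; rfl
      rw [e2] at hstep
      rw [hstep, ih (k + 1) (by omega) (by omega) (pvStart c left k) (rec ++ [pvG c left k])]
      simp

-- the whole equivalence, stated over pvStep/pvG with the ports' literal initial state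
theorem pvKey (c left : Int) :
    ((PySem.List.pyRange 1 100 1).foldl (pvStep c left)
        ((0 : Int), c - 1 + (if 0 < left then (1 : Int) else 0),
          [((0 : Int), c - 1 + (if 0 < left then (1 : Int) else 0), (0 : Int))])).2.2
      = (PySem.List.pyRange 0 100 1).map (pvG c left) := by
  have hs : pvStart c left 0 = 0 := by
    unfold pvStart
    have m0 : max 0 (min (0 : Int) left) = 0 := by omega
    rw [m0, zero_mul, add_zero]
  have he0 : pvEnd c left 0 = c - 1 + (if 0 < left then (1 : Int) else 0) := by
    unfold pvEnd
    rw [hs]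
    norm_num
  have g0 : ((0 : Int), c - 1 + (if 0 < left then (1 : Int) else 0), (0 : Int))
      = pvG c left 0 := by
    unfold pvG
    rw [hs, he0]
  rw [g0, ← he0]
  rw [show pvEnd c left 0 = pvEnd c left (1 - 1) from by norm_num]
  rw [pvInv c left 99 1 (by norm_num) (by norm_num) 0 [pvG c left 0]]
  rw [PySem.List.pyRange_one_cons (show (0 : Int) < 100 from by norm_num), List.map_cons]
  rfl

-- ===== VERDICT (by name: the statement is the Claim_ definition above) =====
set_option maxRecDepth 8000 in
theorem slice_index_spec : Claim_equal_slice_index := by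
  intro t _
  unfold Spec_slice_index slice_index slice_index_alt
  dsimp only
  exact pvKey (Int.tdiv t 100) (t - Int.tdiv t 100 * 100)
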